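-- pv_equiv track=rewrite | github.com/waseem-akram-senarios/it-curve-full-frontend-backend-with-pydantic-testing | context_manager.py | generate_context_call_title
-- ===== SOURCE A (Python) =====
-- from typing import List, Dict, Optional, Tuple
--
-- def generate_context_call_title(conversation_history: List[Dict], booking_scenario: str = "Book Ride") -> str:
--     """
--     Generate ContextCallTitle based on conversation
--
--     Args:
--         conversation_history: List of conversation messages
--         booking_scenario: Type of booking scenario
--
--     Returns:
--         str: Context call title
--     """
--     # Analyze conversation to determine the main intent
--     if not conversation_history:
--         return booking_scenario
--
--     # Look for specific intents in the conversation
--     intents = []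
--     for message in conversation_history:
--         if message['role'] == 'customer':
--             content = message['content'].lower()
--             if 'book' in content and 'ride' in content:
--                 intents.append('Book Ride')
--             elif 'cancel' in content:
--                 intents.append('Cancel Trip')
--             elif 'reschedule' in content:
--                 intents.append('Reschedule Trip')
--             elif 'return' in content and 'trip' in content:
--                 intents.append('Return Trip Booking')
--             elif 'help' in content or 'support' in content:
--                 intents.append('Customer Support')
--
--     # Return the most specific intent or default
--     if intents:
--         return intents[-1]  # Return the last (most recent) intent
--     return booking_scenario
-- ===== SOURCE B (Python) =====
-- # Table-driven re-implementation: intent rules live in a data table; a generic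
-- # matcher replaces the keyword cascade; the conversation is scanned in reverse
-- # with an early return instead of building the full intents list.
--
-- # Each rule: (list of alternative keyword groups, title); a rule matches when
-- # some group has all its keywords in the content. Order encodes A's elif priority.
-- _INTENT_RULES = [
--     ([["book", "ride"]], "Book Ride"),
--     ([["cancel"]], "Cancel Trip"),
--     ([["reschedule"]], "Reschedule Trip"),
--     ([["return", "trip"]], "Return Trip Booking"),
--     ([["help"], ["support"]], "Customer Support"),
-- ]
--
--
-- def generate_context_call_title(conversation_history, booking_scenario="Book Ride"):
--     for message in reversed(conversation_history):
--         if message['role'] == 'customer':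
--             content = message['content'].lower()
--             for groups, title in _INTENT_RULES:
--                 if any(all(k in content for k in g) for g in groups):
--                     return title
--     return booking_scenario
-- ===== Notes on version B (the rewrite author's own statement) =====
-- stated objective: alternative
-- what changed: B replaces A's build-a-list-then-take-last with a data-driven rules table (keyword groups -> title) consulted by a generic any/all matcher during a single reverse scan with early return; no intents list and no if/elif cascade.
import Mathlib
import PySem

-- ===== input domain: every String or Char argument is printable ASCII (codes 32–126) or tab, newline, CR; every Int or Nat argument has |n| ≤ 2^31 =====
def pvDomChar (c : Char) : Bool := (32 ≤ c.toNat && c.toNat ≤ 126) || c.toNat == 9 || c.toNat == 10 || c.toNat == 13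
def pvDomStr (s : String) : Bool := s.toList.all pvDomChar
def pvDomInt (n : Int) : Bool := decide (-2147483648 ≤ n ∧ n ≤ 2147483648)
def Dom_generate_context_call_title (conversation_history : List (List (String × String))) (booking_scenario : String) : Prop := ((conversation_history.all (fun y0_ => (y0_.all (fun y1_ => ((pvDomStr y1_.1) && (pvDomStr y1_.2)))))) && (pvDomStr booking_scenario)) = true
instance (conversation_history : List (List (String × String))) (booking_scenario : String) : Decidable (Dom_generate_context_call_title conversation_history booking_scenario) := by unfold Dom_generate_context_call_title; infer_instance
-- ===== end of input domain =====

-- B is table-driven: intent rules live in a data table consulted by a generic any/all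
-- matcher during a single reverse scan with early return, instead of A's if/elif
-- cascade building a full intents list and taking its last element (objective: alternative).

-- ===== PORT A =====
-- loop body of 'for message in conversation_history' (appends the matched intent, if any)
def pvStepA (intents : List String) (message : List (String × String)) : List String :=
  if (PySem.Dict.ofList message).get? "role" = some "customer" then
    match (PySem.Dict.ofList message).get? "content" with
    | none => intents   -- KeyError in Python: excluded by Pre_
    | some c =>
      let content := PySem.Str.lower c
      if PySem.Str.isIn "book" content && PySem.Str.isIn "ride" content then intents ++ ["Book Ride"]
      else if PySem.Str.isIn "cancel" content then intents ++ ["Cancel Trip"]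
      else if PySem.Str.isIn "reschedule" content then intents ++ ["Reschedule Trip"]
      else if PySem.Str.isIn "return" content && PySem.Str.isIn "trip" content then intents ++ ["Return Trip Booking"]
      else if PySem.Str.isIn "help" content || PySem.Str.isIn "support" content then intents ++ ["Customer Support"]
      else intents
  else intents

def generate_context_call_title (conversation_history : List (List (String × String))) (booking_scenario : String) : String :=
  if conversation_history = [] then booking_scenario
  else
    let intents := conversation_history.foldl pvStepA []
    match intents.getLast? with
    | some t => t        -- intents[-1]
    | none => booking_scenario

-- ===== PORT B =====
-- the rules table _INTENT_RULES: (alternative keyword groups, title)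
def pvIntentRules : List (List (List String) × String) :=
  [ ([["book", "ride"]], "Book Ride"),
    ([["cancel"]], "Cancel Trip"),
    ([["reschedule"]], "Reschedule Trip"),
    ([["return", "trip"]], "Return Trip Booking"),
    ([["help"], ["support"]], "Customer Support") ]

-- inner 'for groups, title in _INTENT_RULES: if any(all(...)): return title'
def pvFirstRule (content : String) : Option String :=
  (pvIntentRules.find? (fun r =>
    r.1.any (fun g => g.all (fun k => PySem.Str.isIn k content)))).map Prod.snd

-- 'for message in reversed(conversation_history)' with early return
def pvScanBack : List (List (String × String)) → String → String
  | [], booking_scenario => booking_scenario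
  | message :: rest, booking_scenario =>
    if (PySem.Dict.ofList message).get? "role" = some "customer" then
      match (PySem.Dict.ofList message).get? "content" with
      | none => pvScanBack rest booking_scenario   -- KeyError in Python: excluded by Pre_
      | some c =>
        match pvFirstRule (PySem.Str.lower c) with
        | some title => title
        | none => pvScanBack rest booking_scenario
    else pvScanBack rest booking_scenario

def generate_context_call_title_alt (conversation_history : List (List (String × String))) (booking_scenario : String) : String :=
  pvScanBack conversation_history.reverse booking_scenario

-- ===== PRECONDITION & SPEC =====
-- Pre_ excludes exactly the inputs where Python A raises KeyError: a message without a
-- 'role' key, or a customer message without a 'content' key.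
def Pre_generate_context_call_title (conversation_history : List (List (String × String))) (booking_scenario : String) : Prop :=
  ∀ message ∈ conversation_history,
    (PySem.Dict.ofList message).get? "role" ≠ none ∧
    ((PySem.Dict.ofList message).get? "role" = some "customer" →
      (PySem.Dict.ofList message).get? "content" ≠ none)
instance (conversation_history : List (List (String × String))) (booking_scenario : String) : Decidable (Pre_generate_context_call_title conversation_history booking_scenario) := by unfold Pre_generate_context_call_title; infer_instance

def pvWitness_generate_context_call_title : (List (List (String × String))) × String :=
  ([[("role", "customer"), ("content", "please cancel my trip")], [("role", "agent"), ("content", "done")]], "Book Ride")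

def Spec_generate_context_call_title (conversation_history : List (List (String × String))) (booking_scenario : String) (out : String) : Prop := out = generate_context_call_title_alt conversation_history booking_scenario
instance (conversation_history : List (List (String × String))) (booking_scenario : String) (out : String) : Decidable (Spec_generate_context_call_title conversation_history booking_scenario out) := by unfold Spec_generate_context_call_title; infer_instance

-- ===== CLAIM (what is proved, stated in full; the proofs are below) =====
def Claim_equal_generate_context_call_title : Prop := ∀ (conversation_history : List (List (String × String))) (booking_scenario : String), Dom_generate_context_call_title conversation_history booking_scenario → Pre_generate_context_call_title conversation_history booking_scenario → Spec_generate_context_call_title conversation_history booking_scenario (generate_context_call_title conversation_history booking_scenario)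

-- ===== LEMMAS AND PROOFS =====

-- proof-side characterisation: the intent a single message contributes in A
def pvMsgIntent (message : List (String × String)) : Option String :=
  if (PySem.Dict.ofList message).get? "role" = some "customer" then
    match (PySem.Dict.ofList message).get? "content" with
    | none => none
    | some c => pvFirstRule (PySem.Str.lower c)
  else none

-- the table lookup computes exactly A's elif cascade
theorem pvFirstRule_eq (content : String) :
    pvFirstRule content =
      (if PySem.Str.isIn "book" content && PySem.Str.isIn "ride" content then some "Book Ride"
      else if PySem.Str.isIn "cancel" content then some "Cancel Trip"
      else if PySem.Str.isIn "reschedule" content then some "Reschedule Trip"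
      else if PySem.Str.isIn "return" content && PySem.Str.isIn "trip" content then some "Return Trip Booking"
      else if PySem.Str.isIn "help" content || PySem.Str.isIn "support" content then some "Customer Support"
      else none) := by
  simp only [pvFirstRule, pvIntentRules]
  cases h1 : PySem.Str.isIn "book" content <;>
    cases h2 : PySem.Str.isIn "ride" content <;>
    cases h3 : PySem.Str.isIn "cancel" content <;>
    cases h4 : PySem.Str.isIn "reschedule" content <;>
    cases h5 : PySem.Str.isIn "return" content <;>
    cases h6 : PySem.Str.isIn "trip" content <;>
    cases h7 : PySem.Str.isIn "help" content <;>
    cases h8 : PySem.Str.isIn "support" content <;>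
    simp_all [List.find?, PySem.Str.isIn]

theorem pvStepA_eq (intents : List String) (m : List (String × String)) :
    pvStepA intents m = intents ++ (pvMsgIntent m).toList := by
  unfold pvStepA pvMsgIntent
  split
  · split
    · simp
    · rw [pvFirstRule_eq]
      dsimp only
      split_ifs <;> simp
  · simp

theorem pvFoldl_eq_filterMap (l : List (List (String × String))) (acc : List String) :
    l.foldl pvStepA acc = acc ++ l.filterMap pvMsgIntent := by
  induction l generalizing acc with
  | nil => simp
  | cons m rest ih =>
    rw [List.foldl_cons, pvStepA_eq, ih, List.filterMap_cons]
    cases pvMsgIntent m <;> simp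

theorem pvScanBack_cons (m : List (String × String)) (rest : List (List (String × String))) (bs : String) :
    pvScanBack (m :: rest) bs = match pvMsgIntent m with
      | some t => t
      | none => pvScanBack rest bs := by
  by_cases h : (PySem.Dict.ofList m).get? "role" = some "customer"
  · simp only [pvScanBack, pvMsgIntent, if_pos h]
    cases (PySem.Dict.ofList m).get? "content" with
    | none => rfl
    | some c => cases pvFirstRule (PySem.Str.lower c) <;> rfl
  · simp only [pvScanBack, pvMsgIntent, if_neg h]

theorem pvScanBack_eq (l : List (List (String × String))) (bs : String) :
    pvScanBack l bs = (l.findSome? pvMsgIntent).getD bs := by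
  induction l with
  | nil => simp [pvScanBack]
  | cons m rest ih =>
    rw [pvScanBack_cons, List.findSome?_cons]
    cases pvMsgIntent m
    · simpa using ih
    · rfl

theorem pvFindSome?_eq_head?_filterMap {α β : Type} (f : α → Option β) (l : List α) :
    l.findSome? f = (l.filterMap f).head? := by
  induction l with
  | nil => rfl
  | cons a l ih =>
    rw [List.findSome?_cons, List.filterMap_cons]
    cases h : f a
    · exact ih
    · rfl

-- ===== VERDICT (by name: the statement is the Claim_ definition above) =====
theorem generate_context_call_title_spec : Claim_equal_generate_context_call_title := by
  intro ch bs _ _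
  unfold Spec_generate_context_call_title generate_context_call_title generate_context_call_title_alt
  rw [pvScanBack_eq, pvFindSome?_eq_head?_filterMap, List.filterMap_reverse,
    List.head?_reverse]
  cases ch with
  | nil => rfl
  | cons m rest =>
    rw [if_neg (by simp), pvFoldl_eq_filterMap]
    simp only [List.nil_append]
    cases (List.filterMap pvMsgIntent (m :: rest)).getLast? <;> rfl
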